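-- pv_equiv track=rewrite | github.com/Sweisian/Neural-Stepwork | neural_stepwork/note_predictor.py | decode_step
-- ===== SOURCE A (Python) =====
-- def decode_step(num):
--     """
--     Convert int feature encoding to step line
--     :param num: Int representing feature encoding
--     :return: List of ints in [0, 2]
--     """
--     if num == 0:
--         return [0, 0, 0, 0]
--     step_line = []
--     while num:
--         num, r = divmod(num, 3)
--         step_line.append(r)
--
--     step_line += [0 for _ in range(4 - len(step_line))]
--     return list(reversed(step_line))
-- ===== SOURCE B (Python) =====
-- def decode_step(num):
--     """
--     Convert int feature encoding to step line
--     :param num: Int representing feature encoding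
--     :return: List of ints in [0, 2]
--     """
--     p = 81  # 3**4: minimum width of 4 digits
--     while p <= num:
--         p *= 3
--     step_line = []
--     while p > 1:
--         p //= 3
--         step_line.append((num // p) % 3)
--     return step_line
-- ===== Notes on version B (the rewrite author's own statement) =====
-- stated objective: alternative
-- what changed: Instead of repeatedly dividing num with divmod, collecting remainders, padding and reversing, B first finds the needed power-of-3 width (at least 3^4) and then extracts each digit big-endian directly as (num // 3^i) % 3, so no reversal, no padding list and no special case for 0.
import Mathlib
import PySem

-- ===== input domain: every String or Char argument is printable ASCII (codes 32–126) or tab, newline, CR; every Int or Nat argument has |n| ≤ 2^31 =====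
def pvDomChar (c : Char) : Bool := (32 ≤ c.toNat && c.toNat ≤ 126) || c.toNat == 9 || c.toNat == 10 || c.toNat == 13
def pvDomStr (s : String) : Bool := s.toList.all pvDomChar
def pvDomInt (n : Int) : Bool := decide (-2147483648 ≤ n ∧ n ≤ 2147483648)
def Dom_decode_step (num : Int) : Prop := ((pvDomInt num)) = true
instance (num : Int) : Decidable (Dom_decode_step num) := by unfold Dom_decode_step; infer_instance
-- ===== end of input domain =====

-- B replaces A's divmod while-loop + end-padding + reversed() by first growing a
-- power-of-3 width (at least 3^4) and then extracting each digit big-endian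
-- directly, with no reversal, no pad list and no special case for 0 (objective: alternative).

-- ===== PORT A =====
-- A's 'while num:' loop; the 0 < num guard only makes the recursion total
-- (Python loops forever on negative num, which Pre_ excludes)
def pvLoopA (num : Int) (acc : List Int) : List Int :=
  if num = 0 then acc
  else if _h : 0 < num then
    pvLoopA (PySem.Int.floordiv num 3) (acc ++ [PySem.Int.mod num 3])
  else acc
termination_by num.toNat
decreasing_by
  have h3 : PySem.Int.floordiv num 3 = num / 3 :=
    PySem.Int.floordiv_eq_ediv_of_pos (by omega)
  rw [h3]; omega

def decode_step (num : Int) : List Int :=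
  if num = 0 then [0, 0, 0, 0]
  else
    let step_line := pvLoopA num []
    let step_line := step_line ++ List.replicate (4 - step_line.length) (0 : Int)
    step_line.reverse

-- ===== PORT B =====
-- Source B's first loop: while p <= num: p *= 3  (the 0 < p guard only makes it total)
def pvGrow (num p : Int) : Int :=
  if _h : 0 < p ∧ p ≤ num then pvGrow num (p * 3) else p
termination_by (num + 1 - p).toNat
decreasing_by omega

-- Source B's second loop: while p > 1: p //= 3; step_line.append((num // p) % 3)
def pvEmit (num p : Int) (acc : List Int) : List Int :=
  if _h : 1 < p then
    let p' := PySem.Int.floordiv p 3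
    pvEmit num p' (acc ++ [PySem.Int.mod (PySem.Int.floordiv num p') 3])
  else acc
termination_by p.toNat
decreasing_by
  have h3 : PySem.Int.floordiv p 3 = p / 3 :=
    PySem.Int.floordiv_eq_ediv_of_pos (by omega)
  rw [h3]; omega

def decode_step_alt (num : Int) : List Int :=
  pvEmit num (pvGrow num 81) []

-- ===== PRECONDITION & SPEC =====
-- A's while loop never terminates for negative num (divmod by 3 keeps num negative forever)
def Pre_decode_step (num : Int) : Prop := 0 ≤ num
instance (num : Int) : Decidable (Pre_decode_step num) := by unfold Pre_decode_step; infer_instance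
def pvWitness_decode_step : Int := (7)

def Spec_decode_step (num : Int) (out : List Int) : Prop := out = decode_step_alt num
instance (num : Int) (out : List Int) : Decidable (Spec_decode_step num out) := by unfold Spec_decode_step; infer_instance

-- ===== CLAIM (what is proved, stated in full; the proofs are below) =====
def Claim_equal_decode_step : Prop := ∀ (num : Int), Dom_decode_step num → Pre_decode_step num → Spec_decode_step num (decode_step num)

-- ===== LEMMAS AND PROOFS =====

-- big-endian base-3 digits of n (no padding); proof-side characterisation of both ports
def pvDigits (n : Int) : List Int :=
  if n = 0 then []
  else if _h : 0 < n then pvDigits (n / 3) ++ [n % 3]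
  else []
termination_by n.toNat
decreasing_by omega

theorem pvDigits_zero : pvDigits 0 = [] := by rw [pvDigits]; simp

-- the k big-endian digits [n/3^(k-1)%3, …, n/3^0%3]
def pvE (n : Int) (k : Nat) : List Int :=
  ((List.range k).reverse).map (fun j => n / 3 ^ j % 3)

theorem pvLoopA_eq (num : Int) (acc : List Int) (h : 0 ≤ num) :
    pvLoopA num acc = acc ++ (pvDigits num).reverse := by
  unfold pvLoopA pvDigits
  split
  · simp
  · split
    · rename_i h0 hp
      rw [PySem.Int.floordiv_eq_ediv_of_pos (by omega),
          PySem.Int.mod_eq_emod_of_pos (by omega),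
          pvLoopA_eq _ _ (by omega)]
      simp
    · omega
termination_by num.toNat
decreasing_by omega

theorem pvE_succ (n : Int) (k : Nat) :
    pvE n (k + 1) = pvE (n / 3) k ++ [n % 3] := by
  unfold pvE
  rw [List.range_succ_eq_map]
  simp [Function.comp_def, pow_succ]
  intro j _
  rw [mul_comm, ← Int.ediv_ediv_of_nonneg (by norm_num)]

theorem pvEmit_eq (k : Nat) : ∀ (num : Int) (acc : List Int), 0 ≤ num →
    pvEmit num (3 ^ k) acc = acc ++ pvE num k := by
  induction k with
  | zero =>
    intro num acc h
    unfold pvEmit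
    simp [pvE]
  | succ k ih =>
    intro num acc h
    unfold pvEmit
    have hpos : (0:Int) < 3 ^ k := by positivity
    have hge1 : (1:Int) ≤ 3 ^ k := hpos
    have h1 : (1:Int) < 3 ^ (k + 1) := by
      rw [pow_succ]; nlinarith
    rw [dif_pos h1]
    have hdiv : PySem.Int.floordiv ((3:Int) ^ (k+1)) 3 = 3 ^ k := by
      rw [PySem.Int.floordiv_eq_ediv_of_pos (by omega), pow_succ,
          Int.mul_ediv_cancel _ (by omega)]
    simp only [hdiv]
    have hq : (0:Int) ≤ num / 3 ^ k := Int.ediv_nonneg h (pow_nonneg (by norm_num) k)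
    rw [PySem.Int.floordiv_eq_ediv_of_pos (by omega),
        PySem.Int.mod_eq_emod_of_pos (by omega), ih _ _ h]
    -- pvE num (k+1) = (num / 3^k % 3) :: pvE num k
    have : pvE num (k + 1) = (num / 3 ^ k % 3) :: pvE num k := by
      unfold pvE
      rw [List.range_succ]
      simp
    rw [this]; simp

-- padded characterisation of pvE
theorem pvE_pad (k : Nat) : ∀ (n : Int), 0 ≤ n → n < 3 ^ k →
    pvE n k = List.replicate (k - (pvDigits n).length) 0 ++ pvDigits n := by
  induction k with
  | zero =>
    intro n h1 h2
    have : n = 0 := by omega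
    subst this
    simp [pvE, pvDigits]
  | succ k ih =>
    intro n h1 h2
    have hP : (0:Int) < 3 ^ k := by positivity
    have h3 : (3:Int) ^ (k+1) = 3 * 3 ^ k := by ring
    rw [pvE_succ]
    by_cases h0 : n = 0
    · subst h0
      rw [pvDigits_zero]
      simp only [Int.zero_ediv, Int.zero_emod]
      rw [ih 0 le_rfl hP, pvDigits_zero]
      simp [← List.replicate_succ']
    · have hrec : pvDigits n = pvDigits (n / 3) ++ [n % 3] := by
        rw [pvDigits]; rw [if_neg h0, dif_pos (by omega)]
      have hlt : n / 3 < 3 ^ k := by omega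
      rw [ih (n / 3) (by omega) hlt, hrec]
      have hlen : (pvDigits (n / 3) ++ [n % 3]).length
          = (pvDigits (n / 3)).length + 1 := by simp
      rw [hlen]
      simp [Nat.succ_sub_succ]

theorem pvDigits_len_le (k : Nat) : ∀ (n : Int), 0 ≤ n → n < 3 ^ k →
    (pvDigits n).length ≤ k := by
  induction k with
  | zero =>
    intro n h1 h2
    have : n = 0 := by omega
    subst this; rw [pvDigits]; simp
  | succ k ih =>
    intro n h1 h2
    by_cases h0 : n = 0
    · subst h0; rw [pvDigits]; simp
    · have hP : (0:Int) < 3 ^ k := by positivity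
      have h3 : (3:Int) ^ (k+1) = 3 * 3 ^ k := by ring
      rw [pvDigits, if_neg h0, dif_pos (by omega)]
      have := ih (n / 3) (by omega) (by omega)
      simp; omega

theorem pvDigits_lt_len (k : Nat) : ∀ (n : Int), 3 ^ k ≤ n →
    k < (pvDigits n).length := by
  induction k with
  | zero =>
    intro n h
    rw [pvDigits, if_neg (by omega), dif_pos (by omega)]
    simp
  | succ k ih =>
    intro n h
    have hP : (0:Int) < 3 ^ k := by positivity
    have h3 : (3:Int) ^ (k+1) = 3 * 3 ^ k := by ring
    rw [pvDigits, if_neg (by omega), dif_pos (by omega)]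
    have := ih (n / 3) (by omega)
    simp; omega

theorem pvGrow_spec (num : Int) (j : Nat) :
    ∃ k, j ≤ k ∧ pvGrow num (3 ^ j) = 3 ^ k ∧ num < 3 ^ k ∧
      (k = j ∨ 3 ^ (k - 1) ≤ num) := by
  have hp : (0:Int) < 3 ^ j := by positivity
  rw [pvGrow]
  split
  · rename_i hle
    have h3 : (3:Int) ^ j * 3 = 3 ^ (j + 1) := by ring
    obtain ⟨k, hk1, hk2, hk3, hk4⟩ := pvGrow_spec num (j + 1)
    refine ⟨k, by omega, by rw [← hk2, h3], hk3, ?_⟩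
    rcases hk4 with h | h
    · right; subst h; simp only [Nat.add_sub_cancel]; exact hle.2
    · right; exact h
  · rename_i hgt
    exact ⟨j, le_rfl, rfl, by omega, Or.inl rfl⟩
termination_by (num + 1 - 3 ^ j).toNat
decreasing_by
  rename_i hle
  have _h1 : (1:Int) ≤ 3 ^ j := hp
  have _h4 : (3:Int) ^ (j + 1) = 3 * 3 ^ j := by ring
  omega

-- ===== VERDICT (by name: the statement is the Claim_ definition above) =====
theorem decode_step_spec : Claim_equal_decode_step := by
  intro num _ hpre
  unfold Spec_decode_step decode_step decode_step_alt
  have hpre' : (0:Int) ≤ num := hpre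
  -- analyse B
  have h81 : (81:Int) = 3 ^ 4 := by norm_num
  obtain ⟨k, hk4, hgrow, hlt, hcase⟩ := pvGrow_spec num 4
  rw [h81, hgrow, pvEmit_eq k num [] hpre',
      pvE_pad k num hpre' hlt]
  have hlen : (pvDigits num).length ≤ k := pvDigits_len_le k num hpre' hlt
  split
  · -- num = 0
    rename_i h0
    subst h0
    have hk : k = 4 := by
      rcases hcase with h | h
      · exact h
      · exfalso; have : (0:Int) < 3 ^ (k-1) := by positivity
        omega
    subst hk
    rw [pvDigits]
    simp [List.replicate]
  · -- num ≠ 0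
    rename_i h0
    rw [pvLoopA_eq num [] hpre']
    simp only [List.nil_append, List.reverse_append, List.reverse_reverse,
      List.reverse_replicate, List.length_reverse]
    have hpad : 4 - (pvDigits num).length = k - (pvDigits num).length := by
      rcases hcase with h | h
      · omega
      · have := pvDigits_lt_len (k - 1) num h
        omega
    rw [hpad]
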